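-- pv_equiv track=rewrite | github.com/code-with-vanhai/agent-bootstrap-template | scripts/agent-sync.py | ordered_manifest_with_sync
-- ===== SOURCE A (Python) =====
-- from collections import OrderedDict
--
-- def ordered_manifest_with_sync(data, sync_values):
--     result = OrderedDict()
--     inserted = False
--     for key, value in data.items():
--         if key in sync_values:
--             continue
--         result[key] = value
--         if key == "instantiated_from_template_version":
--             for sync_key in ("synced_to_template_version", "synced_to_template_commit", "synced_at"):
--                 if sync_key in sync_values:
--                     result[sync_key] = sync_values[sync_key]
--             inserted = True
--     if not inserted:
--         for sync_key in ("synced_to_template_version", "synced_to_template_commit", "synced_at"):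
--             if sync_key in sync_values:
--                 result[sync_key] = sync_values[sync_key]
--     return result
-- ===== SOURCE B (Python) =====
-- from collections import OrderedDict
--
-- def ordered_manifest_with_sync(data, sync_values):
--     pairs = [(k, v) for k, v in data.items() if k not in sync_values]
--     block = [(sk, sync_values[sk])
--              for sk in ("synced_to_template_version", "synced_to_template_commit", "synced_at")
--              if sk in sync_values]
--     keys = [k for k, _ in pairs]
--     if "instantiated_from_template_version" in keys:
--         cut = keys.index("instantiated_from_template_version") + 1
--     else:
--         cut = len(pairs)
--     return OrderedDict(pairs[:cut] + block + pairs[cut:])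
-- ===== Notes on version B (the rewrite author's own statement) =====
-- stated objective: alternative
-- what changed: A's single stateful loop that mutates an OrderedDict and splices the sync entries inline behind a flag is replaced by an index-and-slice construction: filter the items, compute the sync block, locate the anchor key's position with list.index, and build the result as pairs[:cut] + block + pairs[cut:] in one concatenation, with cut = len(pairs) when the anchor was filtered out or absent.
import Mathlib
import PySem

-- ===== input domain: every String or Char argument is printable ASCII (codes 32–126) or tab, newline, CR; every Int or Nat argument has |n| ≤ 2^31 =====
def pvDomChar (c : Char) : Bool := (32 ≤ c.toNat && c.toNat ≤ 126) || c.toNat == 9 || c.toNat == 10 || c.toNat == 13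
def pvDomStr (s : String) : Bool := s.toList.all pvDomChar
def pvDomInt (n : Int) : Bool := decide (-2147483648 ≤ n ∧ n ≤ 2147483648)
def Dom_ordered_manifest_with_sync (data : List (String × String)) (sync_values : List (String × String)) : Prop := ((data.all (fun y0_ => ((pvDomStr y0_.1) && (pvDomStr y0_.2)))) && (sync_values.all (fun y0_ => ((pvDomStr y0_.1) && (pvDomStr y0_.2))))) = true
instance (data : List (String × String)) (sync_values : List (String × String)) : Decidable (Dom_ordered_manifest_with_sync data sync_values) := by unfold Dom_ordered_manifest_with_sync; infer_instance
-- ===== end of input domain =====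

-- B replaces A's stateful inline-insertion loop by an index-and-slice construction: filter the
-- items, find the anchor key's position with list.index, and build pairs[:cut]+block+pairs[cut:];
-- same cost, no speed claim.

-- the fixed key after which the sync block is spliced, and the fixed order of the sync keys
def pvTK : String := "instantiated_from_template_version"
def pvSyncKeys : List String := ["synced_to_template_version", "synced_to_template_commit", "synced_at"]

-- ===== PORT A =====
-- the inner "for sync_key in (...): if sync_key in sync_values: result[sync_key] = sync_values[sync_key]" loop
def pvAddSync (res : PySem.Dict String String) (sv : PySem.Dict String String) : PySem.Dict String String :=
  pvSyncKeys.foldl (fun r sk => if sv.contains sk then r.insert sk (sv.getD sk "") else r) res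

-- one iteration of A's main loop; state = (result, inserted)
def pvAStep (sv : PySem.Dict String String) (st : PySem.Dict String String × Bool) (kv : String × String) : PySem.Dict String String × Bool :=
  if sv.contains kv.1 then st
  else
    let r := st.1.insert kv.1 kv.2
    if kv.1 = pvTK then (pvAddSync r sv, true) else (r, st.2)

def ordered_manifest_with_sync (data : List (String × String)) (sync_values : List (String × String)) : List (String × String) :=
  let sv := PySem.Dict.ofList sync_values
  let st := (PySem.Dict.ofList data).items.foldl (pvAStep sv) (PySem.Dict.empty, false)
  (if st.2 then st.1 else pvAddSync st.1 sv).items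

-- ===== PORT B =====
-- the sync block, computed once: [(sk, sync_values[sk]) for sk in (...) if sk in sync_values]
def pvBlock (sv : PySem.Dict String String) : List (String × String) :=
  pvSyncKeys.filterMap (fun sk => (sv.get? sk).map (fun v => (sk, v)))

def ordered_manifest_with_sync_alt (data : List (String × String)) (sync_values : List (String × String)) : List (String × String) :=
  let sv := PySem.Dict.ofList sync_values
  let pairs := (PySem.Dict.ofList data).items.filter (fun kv => !(sv.contains kv.1))
  let block := pvBlock sv
  let keys := pairs.map (fun kv => kv.1)
  -- "keys.index(pvTK) + 1 if pvTK in keys else len(pairs)"; pairs[:cut] / pairs[cut:] = take / drop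
  let cut : Nat := match PySem.List.index? keys pvTK with
    | some i => i + 1
    | none => pairs.length
  (PySem.Dict.ofList (pairs.take cut ++ block ++ pairs.drop cut)).items

-- ===== PRECONDITION & SPEC =====
def Spec_ordered_manifest_with_sync (data : List (String × String)) (sync_values : List (String × String)) (out : List (String × String)) : Prop := out = ordered_manifest_with_sync_alt data sync_values
instance (data : List (String × String)) (sync_values : List (String × String)) (out : List (String × String)) : Decidable (Spec_ordered_manifest_with_sync data sync_values out) := by unfold Spec_ordered_manifest_with_sync; infer_instance

-- ===== CLAIM (what is proved, stated in full; the proofs are below) =====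
def Claim_equal_ordered_manifest_with_sync : Prop := ∀ (data : List (String × String)) (sync_values : List (String × String)), Dom_ordered_manifest_with_sync data sync_values → Spec_ordered_manifest_with_sync data sync_values (ordered_manifest_with_sync data sync_values)

-- ===== LEMMAS AND PROOFS =====

-- proof-only intermediate: one step of a flagged splicing pass (used to characterise A's fold)
def pvBStep (block : List (String × String)) (st : List (String × String) × Bool) (kv : String × String) : List (String × String) × Bool :=
  let out := st.1 ++ [kv]
  if kv.1 = pvTK then (out ++ block, true) else (out, st.2)

lemma pvBlock_mem {sv : PySem.Dict String String} {p : String × String} (hp : p ∈ pvBlock sv) :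
    p.1 ∈ pvSyncKeys ∧ sv.contains p.1 = true := by
  unfold pvBlock at hp
  rcases List.mem_filterMap.1 hp with ⟨sk, hsk, hmap⟩
  rcases Option.map_eq_some_iff.1 hmap with ⟨w, hg, rfl⟩
  exact ⟨hsk, by simp [PySem.Dict.contains_eq_isSome_get?, hg]⟩

lemma pvKeysFmSub (g : String → Option String) (ks : List String) :
    ((ks.filterMap (fun sk => (g sk).map (fun v => (sk, v)))).map (fun p => p.1)).Sublist ks := by
  induction ks with
  | nil => simp
  | cons k ks ih =>
    cases h : g k
    · simpa [List.filterMap_cons, h] using ih.cons k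
    · simpa [List.filterMap_cons, h] using ih.cons₂ k

lemma pvBlock_keys_nodup (sv : PySem.Dict String String) :
    ((pvBlock sv).map (fun p => p.1)).Nodup :=
  (pvKeysFmSub (sv.get?) pvSyncKeys).nodup (by decide)

lemma pvNotMemKeys {d : PySem.Dict String String} {x : String} (h : d.contains x = false) :
    x ∉ d.keys := by
  rw [PySem.Dict.contains_eq_decide_mem_keys] at h
  simpa using h

lemma pvOfList_items_of_nodup (l : List (String × String)) (h : (l.map (fun p => p.1)).Nodup) :
    (PySem.Dict.ofList l).items = l := by
  have := PySem.Dict.items_foldl_insert_fresh l (fun p => p.1) (fun p => p.2)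
      PySem.Dict.empty (by intro a _; exact PySem.Dict.contains_empty _) h
  simpa [PySem.Dict.ofList, PySem.Dict.update] using this

lemma pvGuardFold (sv : PySem.Dict String String) :
    ∀ (ks : List String) (res : PySem.Dict String String),
    (∀ sk ∈ ks, sv.contains sk = true → res.contains sk = false) → ks.Nodup →
    ks.foldl (fun r sk => if sv.contains sk then r.insert sk (sv.getD sk "") else r) res
      = PySem.Dict.mk (res.items ++ ks.filterMap (fun sk => (sv.get? sk).map (fun v => (sk, v)))) := by
  intro ks
  induction ks with
  | nil => intro res _ _; simp
  | cons k ks ih =>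
    intro res hfresh hnd
    by_cases hc : sv.contains k = true
    · rcases Option.isSome_iff_exists.1 (by rw [← PySem.Dict.contains_eq_isSome_get? sv k]; exact hc) with ⟨w, hw⟩
      have hres : res.contains k = false := hfresh k (by simp) hc
      have hins : (res.insert k (sv.getD k "")).items = res.items ++ [(k, w)] := by
        rw [PySem.Dict.items_insert_of_not_contains res _ hres,
          PySem.Dict.getD_eq_get?_getD, hw]
        rfl
      rw [List.foldl_cons, if_pos hc, ih _ ?_ hnd.of_cons]
      · rw [List.filterMap_cons]
        simp [hw, hins]
      · intro sk hsk hsv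
        rw [PySem.Dict.contains_insert]
        have : sk ≠ k := fun e => (List.nodup_cons.1 hnd).1 (e ▸ hsk)
        simp [this, hfresh sk (by simp [hsk]) hsv]
    · have hg : sv.get? k = none := by
        rw [PySem.Dict.contains_eq_isSome_get?] at hc
        exact Option.not_isSome_iff_eq_none.1 (by simpa using hc)
      rw [List.foldl_cons, if_neg hc, List.filterMap_cons]
      simp only [hg, Option.map_none]
      exact ih res (fun sk hsk => hfresh sk (by simp [hsk])) hnd.of_cons

lemma pvAddSync_eq (sv res : PySem.Dict String String)
    (h : ∀ sk ∈ pvSyncKeys, sv.contains sk = true → res.contains sk = false) :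
    pvAddSync res sv = PySem.Dict.mk (res.items ++ pvBlock sv) :=
  pvGuardFold sv pvSyncKeys res h (by decide)

lemma pvMain (sv : PySem.Dict String String) (l : List (String × String)) :
    ∀ (res : PySem.Dict String String) (ins : Bool),
    (l.map (fun p => p.1)).Nodup →
    (∀ kv ∈ l, sv.contains kv.1 = false → res.contains kv.1 = false) →
    (sv.contains pvTK = false → pvTK ∈ l.map (fun p => p.1) →
      ∀ sk ∈ pvSyncKeys, sv.contains sk = true → res.contains sk = false) →
    (ins = false → ∀ sk ∈ pvSyncKeys, sv.contains sk = true → res.contains sk = false) →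
    res.keys.Nodup →
    ((l.filter (fun kv => !(sv.contains kv.1))).foldl (pvBStep (pvBlock sv)) (res.items, ins)
        = ((l.foldl (pvAStep sv) (res, ins)).1.items, (l.foldl (pvAStep sv) (res, ins)).2))
    ∧ ((l.foldl (pvAStep sv) (res, ins)).2 = false →
        ∀ sk ∈ pvSyncKeys, sv.contains sk = true → (l.foldl (pvAStep sv) (res, ins)).1.contains sk = false)
    ∧ (l.foldl (pvAStep sv) (res, ins)).1.keys.Nodup := by
  induction l with
  | nil => intro res ins _ _ _ hins hknd; exact ⟨rfl, hins, hknd⟩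
  | cons kv l ih =>
    obtain ⟨k, v⟩ := kv
    intro res ins hnd hres hTK hins hknd
    rw [List.map_cons, List.nodup_cons] at hnd
    obtain ⟨hknotin, hndl⟩ := hnd
    cases hc : sv.contains k with
    | true =>
      simp only [List.filter_cons, List.foldl_cons, hc, Bool.not_true]
      have hstep : pvAStep sv (res, ins) (k, v) = (res, ins) := by simp [pvAStep, hc]
      rw [hstep]
      refine ih res ins hndl (fun kv hm h => hres kv (List.mem_cons_of_mem _ hm) h) ?_ hins hknd
      intro hTKc hmem
      exact hTK hTKc (List.mem_cons_of_mem _ hmem)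
    | false =>
      have hresk : res.contains k = false := hres (k, v) (by simp) hc
      have hitems : (res.insert k v).items = res.items ++ [(k, v)] :=
        PySem.Dict.items_insert_of_not_contains res v hresk
      simp only [List.filter_cons, List.foldl_cons, hc, Bool.not_false, reduceIte]
      by_cases hk : k = pvTK
      · subst hk
        have hfresh : ∀ sk ∈ pvSyncKeys, sv.contains sk = true →
            (res.insert pvTK v).contains sk = false := by
          intro sk hsk hsv
          rw [PySem.Dict.contains_insert]
          have hne : sk ≠ pvTK := fun e => by rw [e, hc] at hsv; cases hsv
          simp [hne, hTK hc (by simp) sk hsk hsv]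
        have haddeq : pvAddSync (res.insert pvTK v) sv
            = PySem.Dict.mk (res.items ++ (pvTK, v) :: pvBlock sv) := by
          rw [pvAddSync_eq sv _ hfresh, hitems, List.append_assoc]
          rfl
        have hstepA : pvAStep sv (res, ins) (pvTK, v)
            = (PySem.Dict.mk (res.items ++ (pvTK, v) :: pvBlock sv), true) := by
          simp [pvAStep, hc, haddeq]
        have hstepB : pvBStep (pvBlock sv) (res.items, ins) (pvTK, v)
            = ((res.items ++ (pvTK, v) :: pvBlock sv), true) := by
          simp [pvBStep]
        rw [hstepA, hstepB]
        set res' := PySem.Dict.mk (res.items ++ (pvTK, v) :: pvBlock sv) with hres'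
        have hkeys' : res'.keys = res.keys ++ pvTK :: (pvBlock sv).map (fun p => p.1) := by
          rw [hres', PySem.Dict.keys_mk, List.map_append, List.map_cons]
          rfl
        have h1 : ∀ kv ∈ l, sv.contains kv.1 = false → res'.contains kv.1 = false := by
          intro kv hm hf
          rw [PySem.Dict.contains_eq_decide_mem_keys, hkeys']
          have h1a : kv.1 ∉ res.keys := pvNotMemKeys (hres kv (List.mem_cons_of_mem _ hm) hf)
          have h1b : kv.1 ≠ pvTK := fun e => hknotin (e ▸ List.mem_map.2 ⟨kv, hm, rfl⟩)
          have h1c : kv.1 ∉ (pvBlock sv).map (fun p => p.1) := by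
            intro hmem
            rcases List.mem_map.1 hmem with ⟨p, hp, hpe⟩
            rw [← hpe] at hf
            rw [(pvBlock_mem hp).2] at hf
            cases hf
          simp [h1a, h1b, h1c]
        have h4 : res'.keys.Nodup := by
          rw [hkeys', List.nodup_append]
          refine ⟨hknd, ?_, ?_⟩
          · rw [List.nodup_cons]
            constructor
            · intro hmem
              rcases List.mem_map.1 hmem with ⟨p, hp, hpe⟩
              have hcp := (pvBlock_mem hp).2
              rw [hpe, hc] at hcp
              cases hcp
            · exact pvBlock_keys_nodup sv
          · intro x hx y hy he
            subst he
            rcases List.mem_cons.1 hy with he | hmem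
            · exact pvNotMemKeys hresk (he ▸ hx)
            · rcases List.mem_map.1 hmem with ⟨p, hp, hpe⟩
              have hcp := pvBlock_mem hp
              have : res.contains p.1 = false := hTK hc (by simp) p.1 hcp.1 hcp.2
              exact pvNotMemKeys this (hpe ▸ hx)
        refine ih res' true hndl h1 ?_ (by simp) h4
        intro hTKc hmem
        exact absurd hmem hknotin
      · have hstepA : pvAStep sv (res, ins) (k, v) = (res.insert k v, ins) := by
          simp [pvAStep, hc, hk]
        have hstepB : pvBStep (pvBlock sv) (res.items, ins) (k, v)
            = (res.items ++ [(k, v)], ins) := by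
          simp [pvBStep, hk]
        rw [hstepA, hstepB, ← hitems]
        have hkc : ∀ x, (res.insert k v).contains x = (x == k || res.contains x) :=
          fun x => PySem.Dict.contains_insert res k x v
        refine ih (res.insert k v) ins hndl ?_ ?_ ?_ (PySem.Dict.nodup_keys_insert res k v hknd)
        · intro kv hm hf
          rw [hkc]
          have : kv.1 ≠ k := fun e => hknotin (e ▸ List.mem_map.2 ⟨kv, hm, rfl⟩)
          simp [this, hres kv (List.mem_cons_of_mem _ hm) hf]
        · intro hTKc hmem sk hsk hsv
          rw [hkc]
          have : sk ≠ k := fun e => by rw [e, hc] at hsv; cases hsv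
          simp [this, hTK hTKc (List.mem_cons_of_mem _ hmem) sk hsk hsv]
        · intro hinsf sk hsk hsv
          rw [hkc]
          have : sk ≠ k := fun e => by rw [e, hc] at hsv; cases hsv
          simp [this, hins hinsf sk hsk hsv]

-- a flagged pass over a stretch without the anchor key only appends it
lemma pvBNoAnchor (block : List (String × String)) :
    ∀ (l : List (String × String)) (acc : List (String × String)) (b : Bool),
    pvTK ∉ l.map (fun p => p.1) →
    l.foldl (pvBStep block) (acc, b) = (acc ++ l, b) := by
  intro l
  induction l with
  | nil => intro acc b _; simp
  | cons kv l ih =>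
    intro acc b hmem
    rw [List.map_cons, List.mem_cons, not_or] at hmem
    have hk : kv.1 ≠ pvTK := fun e => hmem.1 e.symm
    rw [List.foldl_cons]
    have : pvBStep block (acc, b) kv = (acc ++ [kv], b) := by simp [pvBStep, hk]
    rw [this, ih _ _ hmem.2, List.append_assoc]
    rfl

-- the flagged splicing pass equals the index-and-slice construction (keys assumed nodup)
lemma pvFoldForm (block : List (String × String)) :
    ∀ (l : List (String × String)) (acc : List (String × String)),
    ((l.map (fun p => p.1)).Nodup) →
    l.foldl (pvBStep block) (acc, false) =
      match PySem.List.index? (l.map (fun p => p.1)) pvTK with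
      | some i => (acc ++ l.take (i + 1) ++ block ++ l.drop (i + 1), true)
      | none => (acc ++ l, false) := by
  intro l
  induction l with
  | nil => intro acc _; simp [PySem.List.index?]
  | cons kv l ih =>
    intro acc hnd
    rw [List.map_cons, List.nodup_cons] at hnd
    obtain ⟨hknotin, hndl⟩ := hnd
    by_cases hk : kv.1 = pvTK
    · have hidx : PySem.List.index? (kv.1 :: l.map (fun p => p.1)) pvTK = some 0 := by
        rw [hk]; exact PySem.List.index?_cons_self _ _
      have hstep : pvBStep block (acc, false) kv = (acc ++ [kv] ++ block, true) := by
        simp [pvBStep, hk]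
      have hrest : pvTK ∉ l.map (fun p => p.1) := hk ▸ hknotin
      rw [List.foldl_cons, hstep, pvBNoAnchor block l _ _ hrest, List.map_cons, hidx]
      simp
    · have hidx : PySem.List.index? (kv.1 :: l.map (fun p => p.1)) pvTK
          = (PySem.List.index? (l.map (fun p => p.1)) pvTK).map (· + 1) :=
        PySem.List.index?_cons_of_ne _ hk
      have hstep : pvBStep block (acc, false) kv = (acc ++ [kv], false) := by
        simp [pvBStep, hk]
      rw [List.foldl_cons, hstep, ih _ hndl, List.map_cons, hidx]
      cases h : PySem.List.index? (l.map (fun p => p.1)) pvTK with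
      | none => simp
      | some i =>
        simp only [Option.map_some]
        have ht : (kv :: l).take (i + 1 + 1) = kv :: l.take (i + 1) := rfl
        have hd : (kv :: l).drop (i + 1 + 1) = l.drop (i + 1) := rfl
        rw [ht, hd]
        simp

-- keys of a dict, written as the map of first components over its items
lemma pvKeysEq (d : PySem.Dict String String) : d.keys = d.items.map (fun p => p.1) :=
  PySem.Dict.keys_mk d.items

theorem pv_spec_aux (data sync_values : List (String × String)) :
    ordered_manifest_with_sync data sync_values = ordered_manifest_with_sync_alt data sync_values := by
  simp only [ordered_manifest_with_sync, ordered_manifest_with_sync_alt]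
  set sv := PySem.Dict.ofList sync_values with hsv
  set dd := PySem.Dict.ofList data with hdd
  have hnd : (dd.items.map (fun p => p.1)).Nodup := by
    rw [← pvKeysEq]; exact PySem.Dict.nodup_keys_ofList data
  obtain ⟨hBA, hfresh, hknd⟩ :=
    pvMain sv dd.items PySem.Dict.empty false hnd
      (fun kv _ _ => PySem.Dict.contains_empty kv.1)
      (fun _ _ sk _ _ => PySem.Dict.contains_empty sk)
      (fun _ sk _ _ => PySem.Dict.contains_empty sk)
      PySem.Dict.nodup_keys_empty
  have hempty : (PySem.Dict.empty : PySem.Dict String String).items = [] := rfl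
  rw [hempty] at hBA
  set flt := dd.items.filter (fun kv => !(sv.contains kv.1)) with hflt
  have hndf : (flt.map (fun p => p.1)).Nodup :=
    hnd.sublist (List.Sublist.map (fun (p : String × String) => p.1) List.filter_sublist)
  rw [pvFoldForm (pvBlock sv) flt [] hndf] at hBA
  set st := dd.items.foldl (pvAStep sv) (PySem.Dict.empty, false) with hst
  cases h : PySem.List.index? (flt.map (fun p => p.1)) pvTK with
  | some i =>
    simp only [h, List.nil_append] at hBA
    have h2 : st.2 = true := by
      have := congrArg Prod.snd hBA
      simpa using this.symm
    have h1 : st.1.items = flt.take (i + 1) ++ pvBlock sv ++ flt.drop (i + 1) := by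
      have := congrArg Prod.fst hBA
      simpa using this.symm
    have hnd' : ((flt.take (i + 1) ++ pvBlock sv ++ flt.drop (i + 1)).map (fun p => p.1)).Nodup := by
      rw [← h1, ← pvKeysEq]; exact hknd
    rw [if_pos h2, h1]
    exact (pvOfList_items_of_nodup _ hnd').symm
  | none =>
    simp only [h, List.nil_append] at hBA
    have h2 : st.2 = false := by
      have := congrArg Prod.snd hBA
      simpa using this.symm
    have h1 : st.1.items = flt := by
      have := congrArg Prod.fst hBA
      simpa using this.symm
    rw [if_neg (by rw [h2]; simp)]
    have hf := hfresh h2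
    rw [pvAddSync_eq sv st.1 hf]
    have htd : flt.take flt.length ++ pvBlock sv ++ flt.drop flt.length
        = st.1.items ++ pvBlock sv := by
      rw [List.take_length, List.drop_length, h1, List.append_nil]
    have hnd2 : ((st.1.items ++ pvBlock sv).map (fun p => p.1)).Nodup := by
      rw [List.map_append, List.nodup_append]
      refine ⟨by rw [← pvKeysEq]; exact hknd, pvBlock_keys_nodup sv, ?_⟩
      intro x hx y hy he
      subst he
      rcases List.mem_map.1 hy with ⟨p, hp, hpe⟩
      have hcp := pvBlock_mem hp
      have : st.1.contains p.1 = false := hf p.1 hcp.1 hcp.2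
      exact pvNotMemKeys this (by rw [pvKeysEq]; exact hpe ▸ hx)
    show (PySem.Dict.mk (st.1.items ++ pvBlock sv)).items
        = (PySem.Dict.ofList (flt.take flt.length ++ pvBlock sv ++ flt.drop flt.length)).items
    rw [htd, pvOfList_items_of_nodup _ hnd2]

-- ===== VERDICT (by name: the statement is the Claim_ definition above) =====
theorem ordered_manifest_with_sync_spec : Claim_equal_ordered_manifest_with_sync := by
  intro data sync_values _
  unfold Spec_ordered_manifest_with_sync
  exact pv_spec_aux data sync_values
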